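-- pv_equiv track=rewrite | github.com/MrBrantCode/unitest_baseline | mut_generate/mist_train_cf/cf_79103/solution.py | optimized_lcm
-- ===== SOURCE A (Python) =====
-- def optimized_lcm(x, y, z):
--     """Calculate the least common multiple (LCM) of three numbers using the greatest common divisor (GCD)."""
--
--     def gcd(a, b):
--         """Calculate the Greatest Common Divisor of a and b."""
--         gcd_count = 0
--         while b:
--             a, b = b, a % b
--             gcd_count += 1
--         return a, gcd_count
--
--     gcd_xy, gcd_count_xy = gcd(x, y)
--     lcm_xy = x * y // gcd_xy
--     gcd_xyz, gcd_count_xyz = gcd(lcm_xy, z)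
--     lcm_xyz = lcm_xy * z // gcd_xyz
--     return lcm_xyz, gcd_count_xy + gcd_count_xyz
-- ===== SOURCE B (Python) =====
-- def optimized_lcm(x, y, z):
--     """LCM of three numbers plus total Euclidean iteration count.
--
--     Different decomposition: the Euclidean algorithm is materialised as the
--     explicit remainder chain [a, b, a%b, ...] built recursively; the gcd is the
--     chain's last element and the step count is len(chain)-1.  The pairwise LCM
--     stage is a fold over the remaining arguments (y, z).
--     """
--     def euclid_chain(a, b):
--         if b == 0:
--             return [a]
--         return [a] + euclid_chain(b, a % b)
--
--     acc, total = x, 0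
--     for v in (y, z):
--         seq = euclid_chain(acc, v)
--         acc = acc * v // seq[-1]
--         total += len(seq) - 1
--     return acc, total
-- ===== Notes on version B (the rewrite author's own statement) =====
-- stated objective: alternative
-- what changed: The while-loop gcd with a mutable counter is replaced by a recursive function that materialises the whole Euclidean remainder chain as a list (gcd = last element, count = length-1), and the two staged pairwise-LCM computations become a single fold over (y, z).
import Mathlib
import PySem

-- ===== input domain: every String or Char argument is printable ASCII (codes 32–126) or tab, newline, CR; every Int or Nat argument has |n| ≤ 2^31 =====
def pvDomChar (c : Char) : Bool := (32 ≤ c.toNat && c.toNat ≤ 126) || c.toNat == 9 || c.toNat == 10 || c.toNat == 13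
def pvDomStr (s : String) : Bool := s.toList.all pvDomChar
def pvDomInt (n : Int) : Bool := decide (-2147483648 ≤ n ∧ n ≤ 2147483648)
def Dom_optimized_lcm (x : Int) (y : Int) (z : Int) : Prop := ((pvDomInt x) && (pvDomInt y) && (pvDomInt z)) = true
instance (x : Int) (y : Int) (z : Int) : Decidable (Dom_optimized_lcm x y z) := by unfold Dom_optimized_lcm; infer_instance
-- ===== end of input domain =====

-- B replaces A's while-loop gcd (external counter) by a recursive Euclidean remainder
-- chain (gcd = last element, count = length-1) and folds the pairwise-LCM stages over (y, z);
-- return values proved identical wherever A returns.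

-- Termination fact for Python's floored mod, cited by both ports.
theorem pv_mod_natAbs_lt (a b : Int) (h : b ≠ 0) : (PySem.Int.mod a b).natAbs < b.natAbs := by
  rcases lt_trichotomy b 0 with hb | hb | hb
  · have := PySem.Int.mod_neg_bounds a hb
    omega
  · exact absurd hb h
  · have h1 := PySem.Int.mod_nonneg a hb
    have h2 := PySem.Int.mod_lt a hb
    omega

-- ===== PORT A =====
-- while b: a, b = b, a % b; gcd_count += 1
def pvGcdLoopA (a b cnt : Int) : Int × Int :=
  if h : b = 0 then (a, cnt)
  else pvGcdLoopA b (PySem.Int.mod a b) (cnt + 1)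
termination_by b.natAbs
decreasing_by exact pv_mod_natAbs_lt a b h

def optimized_lcm (x : Int) (y : Int) (z : Int) : Int × Int :=
  match pvGcdLoopA x y 0 with
  | (gcd_xy, gcd_count_xy) =>
    let lcm_xy := PySem.Int.floordiv (x * y) gcd_xy
    match pvGcdLoopA lcm_xy z 0 with
    | (gcd_xyz, gcd_count_xyz) =>
      let lcm_xyz := PySem.Int.floordiv (lcm_xy * z) gcd_xyz
      (lcm_xyz, gcd_count_xy + gcd_count_xyz)

-- ===== PORT B =====
-- euclid_chain(a, b): [a] if b == 0 else [a] + euclid_chain(b, a % b)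
def pvEuclidChain (a b : Int) : List Int :=
  if h : b = 0 then [a]
  else [a] ++ pvEuclidChain b (PySem.Int.mod a b)
termination_by b.natAbs
decreasing_by exact pv_mod_natAbs_lt a b h

-- seq[-1] on the (always nonempty) chain = getLastD; len(seq) - 1 via List.length.
def optimized_lcm_alt (x : Int) (y : Int) (z : Int) : Int × Int :=
  [y, z].foldl
    (fun st v =>
      let seq := pvEuclidChain st.1 v
      (PySem.Int.floordiv (st.1 * v) (seq.getLastD 0), st.2 + ((seq.length : Int) - 1)))
    (x, 0)

-- ===== PRECONDITION & SPEC =====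
-- Pre_ excludes exactly the inputs where the Python A raises ZeroDivisionError
-- (x = y = 0, or z = 0 with x*y = 0, i.e. a zero gcd divisor); B raises there too.
def Pre_optimized_lcm (x : Int) (y : Int) (z : Int) : Prop :=
  (x ≠ 0 ∨ y ≠ 0) ∧ (z ≠ 0 ∨ (x ≠ 0 ∧ y ≠ 0))
instance (x : Int) (y : Int) (z : Int) : Decidable (Pre_optimized_lcm x y z) := by
  unfold Pre_optimized_lcm; infer_instance
def pvWitness_optimized_lcm : Int × Int × Int := (12, 18, 10)

def Spec_optimized_lcm (x : Int) (y : Int) (z : Int) (out : Int × Int) : Prop := out = optimized_lcm_alt x y z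
instance (x : Int) (y : Int) (z : Int) (out : Int × Int) : Decidable (Spec_optimized_lcm x y z out) := by unfold Spec_optimized_lcm; infer_instance

-- ===== CLAIM (what is proved, stated in full; the proofs are below) =====
def Claim_equal_optimized_lcm : Prop := ∀ (x : Int) (y : Int) (z : Int), Dom_optimized_lcm x y z → Pre_optimized_lcm x y z → Spec_optimized_lcm x y z (optimized_lcm x y z)

-- ===== LEMMAS AND PROOFS =====
-- A's loop with accumulator cnt equals (last of the chain, cnt + (chain length - 1)).
theorem pvGcdLoopA_eq_chain (a b cnt : Int) :
    pvGcdLoopA a b cnt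
      = ((pvEuclidChain a b).getLastD 0, cnt + (((pvEuclidChain a b).length : Int) - 1)) := by
  rw [pvGcdLoopA, pvEuclidChain]
  split
  · simp
  · rename_i h
    rw [pvGcdLoopA_eq_chain]
    have hne : pvEuclidChain b (PySem.Int.mod a b) ≠ [] := by
      rw [pvEuclidChain]; split <;> simp
    rcases List.exists_cons_of_ne_nil hne with ⟨c, l, hcl⟩
    simp [hcl, List.getLastD_cons]
    ring
termination_by b.natAbs
decreasing_by exact pv_mod_natAbs_lt a b (by assumption)

-- ===== VERDICT (by name: the statement is the Claim_ definition above) =====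
theorem optimized_lcm_spec : Claim_equal_optimized_lcm := by
  intro x y z _ _
  unfold Spec_optimized_lcm optimized_lcm optimized_lcm_alt
  simp [List.foldl, pvGcdLoopA_eq_chain]
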